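-- pv_equiv track=rewrite | github.com/jes5e/bees-workflow | skills/bees-breakdown-epic/scripts/scoped_marker_resolver.py | extract_subsection
-- ===== SOURCE A (Python) =====
-- HEADING_PREFIX = "### Feature: "
--
-- def extract_subsection(doc_text: str, title: str):
--     lines = doc_text.splitlines()
--     start = None
--     for i, line in enumerate(lines):
--         if not line.startswith(HEADING_PREFIX):
--             continue
--         heading_title = line[len(HEADING_PREFIX):].rstrip()
--         if heading_title == title:
--             start = i + 1
--             break
--     if start is None:
--         return None
--
--     end = len(lines)
--     for j in range(start, len(lines)):
--         if lines[j].startswith(HEADING_PREFIX):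
--             end = j
--             break
--
--     return "\n".join(lines[start:end])
-- ===== SOURCE B (Python) =====
-- HEADING_PREFIX = "### Feature: "
--
-- def extract_subsection(doc_text: str, title: str):
--     collecting = False
--     out = None
--     for line in doc_text.splitlines():
--         if line.startswith(HEADING_PREFIX):
--             if collecting:
--                 break
--             if line[len(HEADING_PREFIX):].rstrip() == title:
--                 collecting = True
--                 out = []
--             continue
--         if collecting:
--             out.append(line)
--     return None if out is None else "\n".join(out)
-- ===== Notes on version B (the rewrite author's own statement) =====
-- stated objective: simpler
-- what changed: Replaces A's two scans (enumerate to find the heading index, then an index loop range(start,len) plus a slice) with one linear pass over the lines carrying a 'collecting' flag and a buffer, with no indices or slicing at all.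
import Mathlib
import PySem

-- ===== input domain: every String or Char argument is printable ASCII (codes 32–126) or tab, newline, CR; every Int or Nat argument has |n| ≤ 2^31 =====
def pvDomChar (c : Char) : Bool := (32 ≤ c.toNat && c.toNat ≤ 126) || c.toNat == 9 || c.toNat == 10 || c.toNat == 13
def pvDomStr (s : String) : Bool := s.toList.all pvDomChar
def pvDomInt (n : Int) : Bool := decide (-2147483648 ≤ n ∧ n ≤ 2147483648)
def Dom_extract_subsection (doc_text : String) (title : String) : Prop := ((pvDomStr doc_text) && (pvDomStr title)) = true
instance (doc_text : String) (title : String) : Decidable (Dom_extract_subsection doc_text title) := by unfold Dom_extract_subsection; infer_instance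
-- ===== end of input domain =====

-- B replaces A's two scans (find the heading index with enumerate, then an index loop plus a slice)
-- with a single pass over the lines carrying a collecting flag and a buffer (objective: simpler).

def HEADING_PREFIX : String := "### Feature: "

-- ===== PORT A =====
-- first loop: 'for i, line in enumerate(lines): …' — returns start = i + 1 at the first matching heading
def aFindStart : List String → String → Nat → Option Nat
  | [], _, _ => none
  | line :: rest, title, i =>
    if !(PySem.Str.startswith line HEADING_PREFIX) then aFindStart rest title (i + 1)
    else if PySem.Str.rstrip (PySem.Str.slice line (some 13) none) == title then some (i + 1)
    else aFindStart rest title (i + 1)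

-- second loop: 'for j in range(start, len(lines)): if lines[j].startswith(…): end = j; break' (default end = len)
def aFindEnd (lines : List String) (j : Nat) : Nat :=
  if h : j < lines.length then
    if PySem.Str.startswith (PySem.List.pyGetD lines (j : Int) "") HEADING_PREFIX then j
    else aFindEnd lines (j + 1)
  else lines.length
termination_by lines.length - j

def extract_subsection (doc_text : String) (title : String) : Option String :=
  let lines := PySem.Str.splitlines doc_text
  match aFindStart lines title 0 with
  | none => none
  | some start =>
    let e := aFindEnd lines start
    some (PySem.Str.join "\n" (PySem.List.slice lines (some (start : Int)) (some (e : Int))))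

-- ===== PORT B =====
-- single pass: collecting flag + optional buffer; a heading while collecting breaks the loop
def bLoop (title : String) : List String → Bool → Option (List String) → Option (List String)
  | [], _, out => out
  | line :: rest, collecting, out =>
    if PySem.Str.startswith line HEADING_PREFIX then
      if collecting then out
      else if PySem.Str.rstrip (PySem.Str.slice line (some 13) none) == title then
        bLoop title rest true (some [])
      else bLoop title rest false out
    else
      if collecting then bLoop title rest true (some (out.getD [] ++ [line]))
      else bLoop title rest collecting out

def extract_subsection_alt (doc_text : String) (title : String) : Option String :=
  match bLoop title (PySem.Str.splitlines doc_text) false none with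
  | none => none
  | some buf => some (PySem.Str.join "\n" buf)

-- ===== PRECONDITION & SPEC =====
def Spec_extract_subsection (doc_text : String) (title : String) (out : Option String) : Prop := out = extract_subsection_alt doc_text title
instance (doc_text : String) (title : String) (out : Option String) : Decidable (Spec_extract_subsection doc_text title out) := by unfold Spec_extract_subsection; infer_instance

-- ===== CLAIM (what is proved, stated in full; the proofs are below) =====
def Claim_equal_extract_subsection : Prop := ∀ (doc_text : String) (title : String), Dom_extract_subsection doc_text title → Spec_extract_subsection doc_text title (extract_subsection doc_text title)

-- ===== LEMMAS AND PROOFS =====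

theorem le_aFindEnd (lines : List String) (j : Nat) (hj : j ≤ lines.length) :
    j ≤ aFindEnd lines j := by
  fun_induction aFindEnd with
  | case1 j h hhead => omega
  | case2 j h hhead ih => have := ih (by omega); omega
  | case3 j h => omega

-- A's second loop plus the slice computes takeWhile (not a heading) of the tail from j
theorem slice_aFindEnd (lines : List String) (j : Nat) :
    (lines.drop j).take (aFindEnd lines j - j)
      = (lines.drop j).takeWhile (fun l => !(PySem.Str.startswith l HEADING_PREFIX)) := by
  fun_induction aFindEnd with
  | case1 j h hhead =>
    have hd : lines.drop j = lines[j] :: lines.drop (j+1) := List.drop_eq_getElem_cons h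
    have hg : PySem.List.pyGetD lines (j:Nat) "" = lines[j] := by
      rw [PySem.List.pyGetD_natCast, List.getD_eq_getElem _ _ h]
    rw [hg] at hhead
    rw [Nat.sub_self, List.take_zero, hd,
      List.takeWhile_cons_of_neg (by simp [-PySem.Str.startswith_eq, hhead])]
  | case2 j h hhead ih =>
    have hd : lines.drop j = lines[j] :: lines.drop (j+1) := List.drop_eq_getElem_cons h
    have hg : PySem.List.pyGetD lines (j:Nat) "" = lines[j] := by
      rw [PySem.List.pyGetD_natCast, List.getD_eq_getElem _ _ h]
    rw [hg] at hhead
    have hhead' : PySem.Str.startswith lines[j] HEADING_PREFIX = false :=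
      Bool.eq_false_iff.mpr hhead
    have hle := le_aFindEnd lines (j+1) (by omega)
    have h2 : aFindEnd lines (j+1) - j = (aFindEnd lines (j+1) - (j+1)) + 1 := by omega
    rw [hd, List.takeWhile_cons_of_pos (by simp [-PySem.Str.startswith_eq, hhead']),
      h2, List.take_succ_cons, ih]
  | case3 j h =>
    have hd : lines.drop j = [] := List.drop_of_length_le (by omega)
    simp [hd]

-- B's collecting phase accumulates exactly the takeWhile
theorem bLoop_collecting (title : String) (ls : List String) (buf : List String) :
    bLoop title ls true (some buf)
      = some (buf ++ ls.takeWhile (fun l => !(PySem.Str.startswith l HEADING_PREFIX))) := by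
  induction ls generalizing buf with
  | nil => simp [bLoop]
  | cons l rest ih =>
    by_cases hl : PySem.Str.startswith l HEADING_PREFIX
    · have hlc : PySem.Chars.startswith l.toList HEADING_PREFIX.toList = true := by
        simpa using hl
      simp [bLoop, hlc]
    · have hlc : PySem.Chars.startswith l.toList HEADING_PREFIX.toList = false := by
        simpa using hl
      simp [bLoop, hlc, ih]

theorem aFindStart_ge (ls : List String) (title : String) (i s : Nat)
    (h : aFindStart ls title i = some s) : i + 1 ≤ s := by
  induction ls generalizing i with
  | nil => simp [aFindStart] at h
  | cons l rest ih =>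
    simp only [aFindStart] at h
    split at h
    · have := ih _ h; omega
    · split at h
      · simp at h; omega
      · have := ih _ h; omega

-- main bridge: B's single scan vs A's first scan followed by takeWhile of the drop
theorem bLoop_eq (title : String) (ls : List String) (i : Nat) :
    bLoop title ls false none
      = match aFindStart ls title i with
        | none => none
        | some s => some ((ls.drop (s - i)).takeWhile (fun l => !(PySem.Str.startswith l HEADING_PREFIX))) := by
  induction ls generalizing i with
  | nil => simp [bLoop, aFindStart]
  | cons l rest ih =>
    by_cases hl : PySem.Str.startswith l HEADING_PREFIX
    · by_cases hm : PySem.Str.rstrip (PySem.Str.slice l (some 13) none) == title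
      · have hlc : PySem.Chars.startswith l.toList HEADING_PREFIX.toList = true := by
          simpa using hl
        simp [bLoop, aFindStart, hlc, hm, bLoop_collecting]
      · simp only [bLoop, aFindStart, hl, hm, if_true, Bool.not_true]
        rw [ih (i+1)]
        cases hfa : aFindStart rest title (i+1) with
        | none => simp
        | some s =>
          have hs := aFindStart_ge rest title (i+1) s hfa
          have hds : (l :: rest).drop (s - i) = rest.drop (s - (i+1)) := by
            have h1 : s - i = (s - (i+1)) + 1 := by omega
            rw [h1, List.drop_succ_cons]
          simp [hds]
    · simp only [bLoop, aFindStart, hl, Bool.not_false, if_true]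
      rw [ih (i+1)]
      cases hfa : aFindStart rest title (i+1) with
      | none => simp
      | some s =>
        have hs := aFindStart_ge rest title (i+1) s hfa
        have hds : (l :: rest).drop (s - i) = rest.drop (s - (i+1)) := by
          have h1 : s - i = (s - (i+1)) + 1 := by omega
          rw [h1, List.drop_succ_cons]
        simp [hds]

-- ===== VERDICT (by name: the statement is the Claim_ definition above) =====
theorem extract_subsection_spec : Claim_equal_extract_subsection := by
  intro doc_text title _
  unfold Spec_extract_subsection
  rw [extract_subsection, extract_subsection_alt,
    bLoop_eq title (PySem.Str.splitlines doc_text) 0]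
  cases hfa : aFindStart (PySem.Str.splitlines doc_text) title 0 with
  | none => simp
  | some s =>
    simp only [Nat.sub_zero, PySem.List.slice_natCast, slice_aFindEnd]
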